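-- pv_equiv track=rewrite | github.com/ngohoangnam28101995/PPNCKH-K33 | TextGenerator.py | choose_word
-- ===== SOURCE A (Python) =====
-- def choose_word(text):
--     text = text.split("+")
--     result = []
--     for word in text:
--         word = word.split("/")
--         word = word[0]
--         result.append(word)
--     return ' '.join(result)
-- ===== SOURCE B (Python) =====
-- def choose_word(text):
--     # single left-to-right scan: a '/' starts skipping until the next '+',
--     # each '+' becomes a space; no intermediate token lists are built
--     out = []
--     skip = False
--     for ch in text:
--         if ch == '+':
--             out.append(' ')
--             skip = False
--         elif ch == '/':
--             skip = True
--         elif not skip: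
--             out.append(ch)
--     return ''.join(out)
-- ===== Notes on version B (the rewrite author's own statement) =====
-- stated objective: alternative
-- what changed: Replaces split-on-'+' / split-on-'/' / index-[0] / join with a single character scan carrying a skip flag (state machine), building the output string directly with no intermediate token lists.
import Mathlib
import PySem

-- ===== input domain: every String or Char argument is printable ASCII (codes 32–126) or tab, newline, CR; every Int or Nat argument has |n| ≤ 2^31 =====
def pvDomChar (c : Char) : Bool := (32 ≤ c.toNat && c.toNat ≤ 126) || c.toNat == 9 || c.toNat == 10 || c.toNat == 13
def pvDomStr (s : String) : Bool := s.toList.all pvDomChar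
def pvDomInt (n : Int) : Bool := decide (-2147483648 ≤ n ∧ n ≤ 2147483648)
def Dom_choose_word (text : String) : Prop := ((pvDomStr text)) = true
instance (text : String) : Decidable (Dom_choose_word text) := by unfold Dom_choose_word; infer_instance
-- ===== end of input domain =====

-- B replaces A's split-into-tokens-and-loop with a single character scan carrying a
-- skip flag; same values on every input (alternative decomposition, no speed claim).

-- ===== PORT A =====
-- A: split on "+", for each token split on "/" and take element [0], join with ' '.
def choose_word (text : String) : String :=
  let parts := PySem.Chars.splitOn text.toList ['+']
  let result := parts.foldl
    (fun (acc : List (List Char)) (word : List Char) =>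
      let w := PySem.Chars.splitOn word ['/']
      let w0 := PySem.List.pyGetD w 0 []   -- word[0]; split never returns an empty list, so no IndexError
      acc ++ [w0]) []
  String.mk (PySem.Chars.join [' '] result)

-- ===== PORT B =====
-- B: one fold over the characters with a skip flag (see Source B).
def choose_word_alt (text : String) : String :=
  String.mk
    (text.toList.foldl
      (fun (st : List Char × Bool) (ch : Char) =>
        if ch = '+' then (st.1 ++ [' '], false)
        else if ch = '/' then (st.1, true)
        else if st.2 then st else (st.1 ++ [ch], st.2))
      ([], false)).1

-- ===== PRECONDITION & SPEC =====
def Spec_choose_word (text : String) (out : String) : Prop := out = choose_word_alt text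
instance (text : String) (out : String) : Decidable (Spec_choose_word text out) := by unfold Spec_choose_word; infer_instance

-- ===== CLAIM (what is proved, stated in full; the proofs are below) =====
def Claim_equal_choose_word : Prop := ∀ (text : String), Dom_choose_word text → Spec_choose_word text (choose_word text)

-- ===== LEMMAS AND PROOFS =====

-- closed-form model of PySem.Chars.splitOn on a one-character separator
def cwPieces (s : Char) : List Char → List (List Char)
  | [] => [[]]
  | c :: t => if c = s then [] :: cwPieces s t else (cwPieces s t).modifyHead (c :: ·)

-- recursive model of B's scan: output still to come, given the current skip flag
def cwEmit : List Char → Bool → List Char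
  | [], _ => []
  | c :: t, skip =>
    if c = '+' then ' ' :: cwEmit t false
    else if c = '/' then cwEmit t true
    else if skip then cwEmit t skip else c :: cwEmit t skip

theorem cwPieces_ne_nil (s : Char) (l : List Char) : cwPieces s l ≠ [] := by
  cases l with
  | nil => simp [cwPieces]
  | cons c t =>
    simp only [cwPieces]
    split
    · simp
    · cases h : cwPieces s t with
      | nil => exact absurd h (cwPieces_ne_nil s t)
      | cons a r => simp

theorem cwGo_nil (s : Char) (cur : List Char) (acc : List (List Char)) (fuel : Nat) :
    PySem.Chars.splitOn.go [s] fuel [] cur acc = (cur.reverse :: acc).reverse := by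
  cases fuel <;> simp [PySem.Chars.splitOn.go]

theorem cwGo_cons (s c : Char) (rest cur : List Char) (acc : List (List Char)) (fuel : Nat) :
    PySem.Chars.splitOn.go [s] (fuel + 1) (c :: rest) cur acc =
      if c = s then PySem.Chars.splitOn.go [s] fuel rest [] (cur.reverse :: acc)
      else PySem.Chars.splitOn.go [s] fuel rest (c :: cur) acc := by
  by_cases h : c = s <;> simp [PySem.Chars.splitOn.go, List.isPrefixOf, h]
  intro h'; exact absurd h'.symm h

theorem cwGo_spec (s : Char) (l : List Char) :
    ∀ (fuel : Nat) (cur : List Char) (acc : List (List Char)), l.length < fuel →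
      PySem.Chars.splitOn.go [s] fuel l cur acc =
        acc.reverse ++ (cwPieces s l).modifyHead (cur.reverse ++ ·) := by
  induction l with
  | nil =>
    intro fuel cur acc _
    simp [cwGo_nil, cwPieces]
  | cons c t ih =>
    intro fuel cur acc hf
    cases fuel with
    | zero => omega
    | succ f =>
      rw [cwGo_cons]
      by_cases h : c = s
      · simp only [h, cwPieces]
        rw [ih f [] _ (by simpa using hf)]
        cases hp : cwPieces s t with
        | nil => exact absurd hp (cwPieces_ne_nil s t)
        | cons a r => simp
      · simp only [cwPieces, if_neg h]
        rw [ih f (c :: cur) acc (by simpa using hf)]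
        cases hp : cwPieces s t with
        | nil => exact absurd hp (cwPieces_ne_nil s t)
        | cons a r => simp

theorem cwSplitOn_eq (s : Char) (l : List Char) :
    PySem.Chars.splitOn l [s] = cwPieces s l := by
  rw [PySem.Chars.splitOn, cwGo_spec s l (l.length + 1) [] [] (by omega)]
  cases hp : cwPieces s l with
  | nil => exact absurd hp (cwPieces_ne_nil s l)
  | cons a r => simp

theorem cwHead_pieces (w : List Char) :
    PySem.List.pyGetD (cwPieces '/' w) 0 [] = w.takeWhile (· != '/') := by
  induction w with
  | nil => simp [cwPieces, PySem.List.pyGetD_zero_cons]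
  | cons c t ih =>
    by_cases h : c = '/'
    · simp [cwPieces, h, PySem.List.pyGetD_zero_cons]
    · simp only [cwPieces, if_neg h]
      cases hp : cwPieces '/' t with
      | nil => exact absurd hp (cwPieces_ne_nil '/' t)
      | cons a r =>
        have ha : a = t.takeWhile (· != '/') := by
          rw [hp] at ih; simpa [PySem.List.pyGetD_zero_cons] using ih
        simp [PySem.List.pyGetD_zero_cons, h, ha]

theorem cwJoin_head_cons (x : Char) (p : List Char) (rest : List (List Char)) :
    PySem.Chars.join [' '] ((x :: p) :: rest) = x :: PySem.Chars.join [' '] (p :: rest) := by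
  cases rest with
  | nil => simp [PySem.Chars.join_singleton]
  | cons q r => rw [PySem.Chars.join_cons_cons, PySem.Chars.join_cons_cons]; simp

theorem cwMain (cs : List Char) :
    cwEmit cs false =
      PySem.Chars.join [' '] ((cwPieces '+' cs).map (·.takeWhile (· != '/'))) ∧
    cwEmit cs true =
      PySem.Chars.join [' '] ([] :: ((cwPieces '+' cs).tail.map (·.takeWhile (· != '/')))) := by
  induction cs with
  | nil => simp [cwEmit, cwPieces, PySem.Chars.join_singleton]
  | cons c t ih =>
    obtain ⟨ih1, ih2⟩ := ih
    cases hp : cwPieces '+' t with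
    | nil => exact absurd hp (cwPieces_ne_nil '+' t)
    | cons h r =>
      rw [hp] at ih1 ih2
      by_cases hplus : c = '+'
      · constructor <;>
          simp [cwEmit, hplus, cwPieces, hp, PySem.Chars.join_cons_cons, ih1]
      · by_cases hslash : c = '/'
        · constructor <;>
            simp [cwEmit, hslash, cwPieces, hp, ih2]
        · have htw : (c :: h).takeWhile (· != '/') = c :: h.takeWhile (· != '/') := by
            simp [hslash]
          constructor
          · rw [show cwEmit (c :: t) false = c :: cwEmit t false by
                  simp [cwEmit, hplus, hslash]]
            simp only [cwPieces, if_neg hplus, hp, List.modifyHead, List.map, htw,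
                       cwJoin_head_cons]
            exact congrArg (c :: ·) ih1
          · simp [cwEmit, hplus, hslash, cwPieces, hp, ih2]

theorem cwFoldlB (cs : List Char) :
    ∀ (out : List Char) (skip : Bool),
      (cs.foldl
        (fun (st : List Char × Bool) (ch : Char) =>
          if ch = '+' then (st.1 ++ [' '], false)
          else if ch = '/' then (st.1, true)
          else if st.2 then st else (st.1 ++ [ch], st.2))
        (out, skip)).1 = out ++ cwEmit cs skip := by
  induction cs with
  | nil => intro out skip; simp [cwEmit]
  | cons c t ih =>
    intro out skip
    by_cases hplus : c = '+'
    · simp [hplus, cwEmit, ih]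
    · by_cases hslash : c = '/'
      · simp [hslash, cwEmit, ih]
      · cases skip with
        | false => simp [hplus, hslash, cwEmit, ih]
        | true => simp [hplus, hslash, cwEmit, ih]

-- ===== VERDICT (by name: the statement is the Claim_ definition above) =====
theorem choose_word_spec : Claim_equal_choose_word := by
  intro text _
  unfold Spec_choose_word choose_word choose_word_alt
  rw [cwFoldlB]
  simp only [List.nil_append]
  rw [PySem.List.foldl_append_singleton_eq_map]
  simp only [cwSplitOn_eq, cwHead_pieces]
  rw [List.nil_append, (cwMain text.toList).1]
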